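-- pv_equiv track=rewrite | github.com/NathanCodingJohnson/SilconXHackathon24 | model.py | detect_words
-- ===== SOURCE A (Python) =====
-- def detect_words(characters, space_threshold=5):
--     words = []
--     current_word = ""
--     for char in characters:
--         if char != " ":  # If character is not a space, add it to the current word
--             current_word += char
--         else:
--             if current_word:
--                 words.append(current_word)
--                 current_word = ""
--             # elif len(current_word) == 0 and len(words) > 0 and len(words[-1]) >= space_threshold:
--             elif len(current_word) == 0 and len(words) > 0 and len(words[-1]) >= space_threshold:
--                 words.append(" ")
--     # Add the last word if it exists
--     if current_word:
--         words.append(current_word)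
--     return words
-- ===== SOURCE B (Python) =====
-- def detect_words(characters, space_threshold=5):
--     # Run-based scan: walk maximal runs of spaces / non-spaces instead of
--     # buffering characters one by one.
--     words = []
--     i, n = 0, len(characters)
--     while i < n:
--         j = i
--         if characters[i] != " ":
--             while j < n and characters[j] != " ":
--                 j += 1
--             words.append(characters[i:j])
--         else:
--             while j < n and characters[j] == " ":
--                 j += 1
--             # the first space of a gap closes the preceding word; the other
--             # j-i-1 spaces each may emit a marker
--             for _ in range(j - i - 1):
--                 if words and len(words[-1]) >= space_threshold:
--                     words.append(" ")
--         i = j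
--     return words
-- ===== Notes on version B (the rewrite author's own statement) =====
-- stated objective: alternative
-- what changed: Replaced A's per-character state machine with a buffered current_word by a two-pointer scan over maximal runs: each non-space run is appended as a whole slice and a space run of length L performs L-1 marker checks, eliminating the character-by-character word buffer.
import Mathlib
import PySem

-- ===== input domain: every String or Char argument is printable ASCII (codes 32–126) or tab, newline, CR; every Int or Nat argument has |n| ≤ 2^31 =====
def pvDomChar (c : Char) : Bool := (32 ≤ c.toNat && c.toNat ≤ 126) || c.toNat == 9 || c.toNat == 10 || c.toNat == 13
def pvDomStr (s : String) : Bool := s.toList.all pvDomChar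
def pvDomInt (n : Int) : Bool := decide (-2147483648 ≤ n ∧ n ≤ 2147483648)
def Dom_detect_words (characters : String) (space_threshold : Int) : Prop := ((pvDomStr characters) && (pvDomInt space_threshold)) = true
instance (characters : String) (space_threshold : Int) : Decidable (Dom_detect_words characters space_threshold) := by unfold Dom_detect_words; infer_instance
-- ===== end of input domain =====

-- B replaces A's per-character state machine by a run-based scan (maximal runs of
-- spaces / non-spaces); alternative decomposition, same cost.

-- len(words[-1]) as an Int (both Pythons compute this on a non-empty list)
def lastLen (ws : List String) : Int := ((ws.getLast?.getD "").toList.length : Int)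

-- ===== PORT A =====
-- one iteration of A's for-loop; state = (words, current_word)
def stepA (t : Int) (st : List String × List Char) (char : Char) : List String × List Char :=
  if char ≠ ' ' then (st.1, st.2 ++ [char])
  else if st.2 ≠ [] then (st.1 ++ [String.ofList st.2], [])
  else if st.1 ≠ [] ∧ lastLen st.1 ≥ t then (st.1 ++ [" "], [])
  else st

def detect_words (characters : String) (space_threshold : Int) : List String :=
  let st := characters.toList.foldl (stepA space_threshold) ([], [])
  if st.2 ≠ [] then st.1 ++ [String.ofList st.2] else st.1

-- ===== PORT B =====
-- one marker check: `if words and len(words[-1]) >= space_threshold: words.append(' ')`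
def markerStep (t : Int) (ws : List String) : List String :=
  if ws ≠ [] ∧ lastLen ws ≥ t then ws ++ [" "] else ws

-- B's while-loop over maximal runs
def altGo (t : Int) : List Char → List String → List String
  | [], words => words
  | c :: rest, words =>
    if c = ' ' then
      -- space run of length 1 + |takeWhile|: j-i-1 marker checks
      altGo t (rest.dropWhile (· = ' '))
        ((List.range (rest.takeWhile (· = ' ')).length).foldl
          (fun ws _ => markerStep t ws) words)
    else
      altGo t (rest.dropWhile (· ≠ ' '))
        (words ++ [String.ofList (c :: rest.takeWhile (· ≠ ' '))])
termination_by cs => cs.length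
decreasing_by
  · exact Nat.lt_succ_of_le (List.length_dropWhile_le _ _)
  · exact Nat.lt_succ_of_le (List.length_dropWhile_le _ _)

def detect_words_alt (characters : String) (space_threshold : Int) : List String :=
  altGo space_threshold characters.toList []

-- ===== PRECONDITION & SPEC =====
def Spec_detect_words (characters : String) (space_threshold : Int) (out : List String) : Prop := out = detect_words_alt characters space_threshold
instance (characters : String) (space_threshold : Int) (out : List String) : Decidable (Spec_detect_words characters space_threshold out) := by unfold Spec_detect_words; infer_instance

-- ===== CLAIM (what is proved, stated in full; the proofs are below) =====
def Claim_equal_detect_words : Prop := ∀ (characters : String) (space_threshold : Int), Dom_detect_words characters space_threshold → Spec_detect_words characters space_threshold (detect_words characters space_threshold)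

-- ===== LEMMAS AND PROOFS =====

-- A's final step
def finA (st : List String × List Char) : List String :=
  if st.2 ≠ [] then st.1 ++ [String.ofList st.2] else st.1

-- folding A's step over a run of non-spaces just extends current_word
theorem foldl_stepA_nonspace (t : Int) :
    ∀ (run : List Char), (∀ c ∈ run, c ≠ ' ') → ∀ (words : List String) (cur : List Char),
      List.foldl (stepA t) (words, cur) run = (words, cur ++ run) := by
  intro run
  induction run with
  | nil => intro _ words cur; simp
  | cons c rs ih =>
    intro h words cur
    have hc : c ≠ ' ' := h c (by simp)
    simp only [List.foldl_cons, stepA, if_pos hc]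
    rw [ih (fun x hx => h x (by simp [hx])) words (cur ++ [c])]
    simp

-- the marker fold, peeled from the front
theorem range_foldl_succ (t : Int) (n : Nat) :
    ∀ (a : List String),
      (List.range (n + 1)).foldl (fun ws _ => markerStep t ws) a
        = (List.range n).foldl (fun ws _ => markerStep t ws) (markerStep t a) := by
  induction n with
  | zero => intro a; simp [List.range_succ]
  | succ n ih =>
    intro a
    rw [List.range_succ, List.foldl_append, ih a, List.range_succ, List.foldl_append]
    simp

-- folding A's step over a run of spaces with empty current_word = B's marker fold
theorem foldl_stepA_space (t : Int) :
    ∀ (run : List Char), (∀ c ∈ run, c = ' ') → ∀ (words : List String),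
      List.foldl (stepA t) (words, []) run
        = ((List.range run.length).foldl (fun ws _ => markerStep t ws) words, []) := by
  intro run
  induction run with
  | nil => intro _ words; simp
  | cons c rs ih =>
    intro h words
    have hc : c = ' ' := h c (by simp)
    subst hc
    have hstep : stepA t (words, []) ' ' = (markerStep t words, []) := by
      simp only [stepA, markerStep]
      split_ifs with h1 h2 h3 <;> simp_all
    simp only [List.foldl_cons, hstep]
    rw [ih (fun x hx => h x (by simp [hx])) (markerStep t words)]
    simp [range_foldl_succ]

-- marker fold from the empty word list is a no-op
theorem marker_fold_nil (t : Int) (n : Nat) :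
    (List.range n).foldl (fun ws _ => markerStep t ws) ([] : List String) = [] := by
  induction n with
  | zero => simp
  | succ n ih => rw [range_foldl_succ]; simpa [markerStep] using ih

theorem head_dropWhile_false {α : Type} (p : α → Bool) :
    ∀ (l : List α) (c : α) (rs : List α), l.dropWhile p = c :: rs → p c = false := by
  intro l
  induction l with
  | nil => intro c rs h; simp at h
  | cons x xs ih =>
    intro c rs h
    rw [List.dropWhile_cons] at h
    by_cases hx : p x = true
    · rw [if_pos hx] at h; exact ih c rs h
    · rw [if_neg hx] at h
      cases h; simpa using hx

-- main lemma: on inputs not starting with a space, A's fold agrees with B's run scan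
theorem main_lemma (t : Int) :
    ∀ (n : Nat) (cs : List Char), cs.length ≤ n →
      (∀ c rs, cs = c :: rs → c ≠ ' ') → ∀ (words : List String),
      finA (List.foldl (stepA t) (words, []) cs) = altGo t cs words := by
  intro n
  induction n with
  | zero =>
    intro cs hlen _ words
    have : cs = [] := List.eq_nil_of_length_eq_zero (Nat.le_zero.mp hlen)
    subst this; simp [finA, altGo]
  | succ n ih =>
    intro cs hlen hhead words
    match cs with
    | [] => simp [finA, altGo]
    | c :: rest =>
      have hc : c ≠ ' ' := hhead c rest rfl
      rw [altGo]
      rw [if_neg hc]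
      -- split cs into the nonspace run and the remainder
      have hsplit : c :: rest
          = (c :: rest.takeWhile (· ≠ ' ')) ++ rest.dropWhile (· ≠ ' ') := by
        simp [List.takeWhile_append_dropWhile]
      rw [hsplit, List.foldl_append]
      have hrun : ∀ x ∈ c :: rest.takeWhile (· ≠ ' '), x ≠ ' ' := by
        intro x hx
        rcases List.mem_cons.mp hx with h | h
        · subst h; exact hc
        · simpa using List.mem_takeWhile_imp h
      rw [foldl_stepA_nonspace t _ hrun words []]
      simp only [List.nil_append]
      set run := c :: rest.takeWhile (· ≠ ' ') with hrundef
      set rest' := rest.dropWhile (· ≠ ' ') with hrestdef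
      match hrest : rest' with
      | [] =>
        simp [finA, altGo]
      | s :: tail =>
        have hs : s = ' ' := by
          have := head_dropWhile_false (fun c => decide (c ≠ ' ')) rest s tail (by
            simpa [hrestdef] using hrest)
          simpa using this
        subst hs
        -- first space flushes the run
        have hflush : stepA t (words, run) ' ' = (words ++ [String.ofList run], []) := by
          simp [stepA, hrundef]
        simp only [List.foldl_cons, hflush]
        -- split tail into its space run and the rest
        have htsplit : tail = tail.takeWhile (· = ' ') ++ tail.dropWhile (· = ' ') := by
          simp [List.takeWhile_append_dropWhile]
        rw [htsplit, List.foldl_append]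
        rw [foldl_stepA_space t _ (fun x hx => by simpa using List.mem_takeWhile_imp hx)]
        -- length bookkeeping for the IH
        have hlen' : (tail.dropWhile (· = ' ')).length ≤ n := by
          have h1 : (tail.dropWhile (· = ' ')).length ≤ tail.length :=
            List.length_dropWhile_le _ _
          have h2 : tail.length < rest.length + 1 := by
            have hd : (' ' :: tail).length ≤ rest.length := by
              rw [← hrest]
              exact List.length_dropWhile_le _ _
            simp at hd
            omega
          have h3 : rest.length + 1 ≤ n + 1 := by simpa using hlen
          omega
        rw [ih _ hlen' (fun x xs hx => by
          have := head_dropWhile_false (fun c => decide (c = ' ')) tail x xs (by simpa using hx)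
          simpa using this)]
        -- B side: altGo on the space-headed remainder
        rw [altGo]
        simp

-- ===== VERDICT (by name: the statement is the Claim_ definition above) =====
theorem detect_words_spec : Claim_equal_detect_words := by
  unfold Claim_equal_detect_words Spec_detect_words
  intro characters t _
  show detect_words characters t = detect_words_alt characters t
  unfold detect_words detect_words_alt
  match hcs : characters.toList with
  | [] => simp [finA, altGo]
  | c :: rest =>
    by_cases hc : c = ' '
    · subst hc
      -- leading space run: both sides are no-ops on the empty word list
      have hrhs : altGo t (' ' :: rest) [] = altGo t (rest.dropWhile (· = ' ')) [] := by
        rw [altGo]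
        simp [marker_fold_nil]
      rw [hrhs]
      have hsplit : (' ' : Char) :: rest
          = ((' ' : Char) :: rest.takeWhile (· = ' ')) ++ rest.dropWhile (· = ' ') := by
        simp [List.takeWhile_append_dropWhile]
      conv_lhs => rw [hsplit]
      rw [List.foldl_append]
      rw [foldl_stepA_space t _ (fun x hx => by
        rcases List.mem_cons.mp hx with h | h
        · exact h
        · simpa using List.mem_takeWhile_imp h)]
      rw [marker_fold_nil]
      exact main_lemma t (rest.dropWhile (· = ' ')).length _ le_rfl
        (fun x xs hx => by
          have := head_dropWhile_false (fun c => decide (c = ' ')) rest x xs (by simpa using hx)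
          simpa using this) []
    · exact main_lemma t (c :: rest).length _ le_rfl
        (fun x xs hx => by cases hx; exact hc) []
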